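-- pv_equiv track=rewrite | github.com/wangqioo/nervus-core | core/arbor/router/dynamic_router.py | _semantically_related
-- ===== SOURCE A (Python) =====
-- def _semantically_related(s1: str, s2: str) -> bool:
--     related_pairs = [
--         ("meeting.recording.processed", "media.photo.classified"),
--         ("media.photo.classified", "memory.travel.moment_captured"),
--         ("health.calorie.meal_logged", "context.user_state.updated"),
--     ]
--     for a, b in related_pairs:
--         if (s1.startswith(a.split(".")[0]) and s2.startswith(b.split(".")[0])) or \
--            (s2.startswith(a.split(".")[0]) and s1.startswith(b.split(".")[0])):
--             return True
--     return False
-- ===== SOURCE B (Python) =====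
-- _PAIR_KEYS = {
--     frozenset({"meeting", "media"}),
--     frozenset({"media", "memory"}),
--     frozenset({"health", "context"}),
-- }
-- _PREFIXES = ["meeting", "media", "memory", "health", "context"]
--
--
-- def _semantically_related(s1: str, s2: str) -> bool:
--     m1 = [p for p in _PREFIXES if s1.startswith(p)]
--     m2 = [p for p in _PREFIXES if s2.startswith(p)]
--     return any(frozenset({a, b}) in _PAIR_KEYS for a in m1 for b in m2)
-- ===== Notes on version B (the rewrite author's own statement) =====
-- stated objective: simpler
-- what changed: A re-splits the dotted topic literals inside a loop over ordered pairs and tests both orientations explicitly; B precomputes the first-segment prefix vocabulary, collects which prefixes each string starts with in two passes, and checks whether any matched pair forms one of three unordered frozenset keys.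
import Mathlib
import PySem

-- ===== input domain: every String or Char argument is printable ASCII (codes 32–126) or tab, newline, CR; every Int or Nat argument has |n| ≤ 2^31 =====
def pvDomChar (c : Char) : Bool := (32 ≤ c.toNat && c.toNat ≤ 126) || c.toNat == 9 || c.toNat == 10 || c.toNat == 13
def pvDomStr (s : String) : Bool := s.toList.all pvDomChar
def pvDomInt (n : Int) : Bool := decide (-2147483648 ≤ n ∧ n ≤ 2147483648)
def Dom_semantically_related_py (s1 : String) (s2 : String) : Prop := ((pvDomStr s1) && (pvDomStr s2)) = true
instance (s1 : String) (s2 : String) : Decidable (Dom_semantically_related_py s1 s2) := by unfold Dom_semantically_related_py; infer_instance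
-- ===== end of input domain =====

-- B replaces A's loop over ordered pairs (with repeated literal re-splitting) by a prefix
-- vocabulary, two matched-prefix passes, and an unordered frozenset-key lookup: simpler.

-- ===== PORT A =====
-- a.split(".")[0]: split? gives the pieces (some, '.' ≠ ''), pyGet? 0 is Python's [0]
-- (the literals always split non-empty, so the getD defaults are never taken).
def srFirstSeg (a : String) : String :=
  (PySem.List.pyGet? ((PySem.Str.split? a ".").getD []) 0).getD ""

-- the for-loop with early 'return True'
def srLoopA (s1 s2 : String) : List (String × String) → Bool
  | [] => false
  | (a, b) :: rest =>
    if (PySem.Str.startswith s1 (srFirstSeg a) && PySem.Str.startswith s2 (srFirstSeg b)) ||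
       (PySem.Str.startswith s2 (srFirstSeg a) && PySem.Str.startswith s1 (srFirstSeg b)) then
      true
    else srLoopA s1 s2 rest

def semantically_related_py (s1 : String) (s2 : String) : Bool :=
  srLoopA s1 s2
    [("meeting.recording.processed", "media.photo.classified"),
     ("media.photo.classified", "memory.travel.moment_captured"),
     ("health.calorie.meal_logged", "context.user_state.updated")]

-- ===== PORT B =====
def srPrefixes : List String := ["meeting", "media", "memory", "health", "context"]

-- the frozenset keys; 'frozenset {a,b} ∈ _PAIR_KEYS' is the unordered match below
def srPairKeys : List (String × String) :=
  [("meeting", "media"), ("media", "memory"), ("health", "context")]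

def srKeyMatch (a b : String) (k : String × String) : Bool :=
  (k.1 == a && k.2 == b) || (k.1 == b && k.2 == a)

def semantically_related_py_alt (s1 : String) (s2 : String) : Bool :=
  let m1 := srPrefixes.filter (fun p => PySem.Str.startswith s1 p)
  let m2 := srPrefixes.filter (fun p => PySem.Str.startswith s2 p)
  m1.any (fun a => m2.any (fun b => srPairKeys.any (srKeyMatch a b)))

-- ===== PRECONDITION & SPEC =====
def Spec_semantically_related_py (s1 : String) (s2 : String) (out : Bool) : Prop := out = semantically_related_py_alt s1 s2
instance (s1 : String) (s2 : String) (out : Bool) : Decidable (Spec_semantically_related_py s1 s2 out) := by unfold Spec_semantically_related_py; infer_instance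

-- ===== CLAIM (what is proved, stated in full; the proofs are below) =====
def Claim_equal_semantically_related_py : Prop := ∀ (s1 : String) (s2 : String), Dom_semantically_related_py s1 s2 → Spec_semantically_related_py s1 s2 (semantically_related_py s1 s2)

-- ===== LEMMAS AND PROOFS =====
theorem srSeg1 : srFirstSeg "meeting.recording.processed" = "meeting" := by decide
theorem srSeg2 : srFirstSeg "media.photo.classified" = "media" := by decide
theorem srSeg3 : srFirstSeg "memory.travel.moment_captured" = "memory" := by decide
theorem srSeg4 : srFirstSeg "health.calorie.meal_logged" = "health" := by decide
theorem srSeg5 : srFirstSeg "context.user_state.updated" = "context" := by decide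

theorem sr_if_or (c x : Bool) : (if c = true then true else x) = (c || x) := by
  cases c <;> simp

-- ===== VERDICT (by name: the statement is the Claim_ definition above) =====
theorem semantically_related_py_spec : Claim_equal_semantically_related_py := by
  intro s1 s2 _
  unfold Spec_semantically_related_py semantically_related_py semantically_related_py_alt
  simp only [srLoopA, sr_if_or, srSeg1, srSeg2, srSeg3, srSeg4, srSeg5,
             srPrefixes, srPairKeys, srKeyMatch,
             List.filter_cons, List.filter_nil, List.any_cons, List.any_nil]
  generalize PySem.Str.startswith s1 "meeting" = b1
  generalize PySem.Str.startswith s1 "media" = b2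
  generalize PySem.Str.startswith s1 "memory" = b3
  generalize PySem.Str.startswith s1 "health" = b4
  generalize PySem.Str.startswith s1 "context" = b5
  generalize PySem.Str.startswith s2 "meeting" = c1
  generalize PySem.Str.startswith s2 "media" = c2
  generalize PySem.Str.startswith s2 "memory" = c3
  generalize PySem.Str.startswith s2 "health" = c4
  generalize PySem.Str.startswith s2 "context" = c5
  revert b1 b2 b3 b4 b5 c1 c2 c3 c4 c5
  decide
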